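-- pv_equiv track=rewrite | github.com/JKaviyashree/SSE-CSA0838-csa0838-day1-JKaviyashree-repository | sum sq odd even.py | sqsum
-- ===== SOURCE A (Python) =====
-- def sqsum(a):
--     odd=0
--     even=0
--     for i in a :
--         if (i%2==0):
--             even=even+(i*i)
--         else:
--             odd=odd+(i*i)
--     a=[odd,even]
--     return a
-- ===== SOURCE B (Python) =====
-- def sqsum(a):
--     odd = sum(i * i for i in a if i % 2)
--     even = sum(i * i for i in a if i % 2 == 0)
--     return [odd, even]
-- ===== Notes on version B (the rewrite author's own statement) =====
-- stated objective: idiomatic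
-- what changed: Replaces the single loop maintaining two accumulators by two independent filtered-comprehension passes, one per parity, combined at the end.
import Mathlib
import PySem

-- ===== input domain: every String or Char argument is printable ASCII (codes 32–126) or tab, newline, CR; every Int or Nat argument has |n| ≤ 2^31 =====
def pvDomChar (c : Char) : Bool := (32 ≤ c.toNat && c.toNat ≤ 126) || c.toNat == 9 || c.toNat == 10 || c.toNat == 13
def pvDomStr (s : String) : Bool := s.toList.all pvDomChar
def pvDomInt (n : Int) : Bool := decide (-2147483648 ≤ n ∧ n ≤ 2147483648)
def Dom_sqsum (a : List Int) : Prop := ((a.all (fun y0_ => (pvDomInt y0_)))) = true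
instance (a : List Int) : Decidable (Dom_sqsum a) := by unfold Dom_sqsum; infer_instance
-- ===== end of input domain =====

-- B replaces A's single two-accumulator loop by two independent filtered passes (idiomatic; same cost).

-- ===== PORT A =====
-- one loop carrying (odd, even); branch order as in A
def sqsum (a : List Int) : List Int :=
  let st := a.foldl (fun (s : Int × Int) i =>
    if PySem.Int.mod i 2 = 0 then (s.1, s.2 + i * i) else (s.1 + i * i, s.2)) (0, 0)
  [st.1, st.2]

-- ===== PORT B =====
-- two filtered passes, one per parity
def sqsum_alt (a : List Int) : List Int :=
  let odd := ((a.filter (fun i => PySem.Int.mod i 2 ≠ 0)).map (fun i => i * i)).sum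
  let even := ((a.filter (fun i => PySem.Int.mod i 2 = 0)).map (fun i => i * i)).sum
  [odd, even]

-- ===== PRECONDITION & SPEC =====
def Spec_sqsum (a : List Int) (out : List Int) : Prop := out = sqsum_alt a
instance (a : List Int) (out : List Int) : Decidable (Spec_sqsum a out) := by unfold Spec_sqsum; infer_instance

-- ===== CLAIM (what is proved, stated in full; the proofs are below) =====
def Claim_equal_sqsum : Prop := ∀ (a : List Int), Dom_sqsum a → Spec_sqsum a (sqsum a)

-- ===== LEMMAS AND PROOFS =====
theorem sqsum_fold_eq (a : List Int) (o e : Int) :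
    a.foldl (fun (s : Int × Int) i =>
      if PySem.Int.mod i 2 = 0 then (s.1, s.2 + i * i) else (s.1 + i * i, s.2)) (o, e)
    = (o + ((a.filter (fun i => PySem.Int.mod i 2 ≠ 0)).map (fun i => i * i)).sum,
       e + ((a.filter (fun i => PySem.Int.mod i 2 = 0)).map (fun i => i * i)).sum) := by
  induction a generalizing o e with
  | nil => simp
  | cons x xs ih =>
    by_cases h : PySem.Int.mod x 2 = 0 <;>
      simp only [List.foldl_cons, List.filter_cons, h, decide_true, decide_false,
        if_true, if_false, ih,
        List.map_cons, List.sum_cons, Prod.mk.injEq, decide_not, Bool.not_true,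
        Bool.not_false, Bool.false_eq_true] <;>
      constructor <;> first | trivial | ring

-- ===== VERDICT (by name: the statement is the Claim_ definition above) =====
theorem sqsum_spec : Claim_equal_sqsum := by
  intro a _
  unfold Spec_sqsum sqsum sqsum_alt
  rw [sqsum_fold_eq]
  simp
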